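-- pv_equiv track=rewrite | github.com/Victor-Grinan-Dev/some_corey_shaffer_lessons | random exercises from internet/solved_hackerRank.py | solv_comunity1
-- ===== SOURCE A (Python) =====
-- def solv_comunity1(s):
--     vowels = 'AEIOU'
--
--     kevsc = 0
--     stusc = 0
--
--     for i in range(len(s)):
--         if s[i] in vowels:
--             kevsc += (len(s) - i)
--         else:
--             stusc += (len(s) - i)
--
--     if kevsc > stusc:
--         return "Kevin", kevsc
--     elif kevsc < stusc:
--         return "Stuart", stusc
--     else:
--         return "Draw", kevsc
-- ===== SOURCE B (Python) =====
-- def solv_comunity1(s):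
--     vowels = 'AEIOU'
--
--     kevsc = 0
--     stusc = 0
--     cv = 0
--     cc = 0
--
--     for c in s:
--         if c in vowels:
--             cv += 1
--         else:
--             cc += 1
--         kevsc += cv
--         stusc += cc
--
--     if kevsc > stusc:
--         return "Kevin", kevsc
--     elif kevsc < stusc:
--         return "Stuart", stusc
--     else:
--         return "Draw", kevsc
-- ===== Notes on version B (the rewrite author's own statement) =====
-- stated objective: alternative
-- what changed: B replaces A's per-position weighting (adding len(s)-i for each index i) by running prefix counts: it increments a vowel/consonant counter per character and adds the running counter to the score each step, so no index and no len(s) is ever used; correct because sum_i [vowel] * (n-i) equals sum over prefixes of the prefix vowel count.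
import Mathlib
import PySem

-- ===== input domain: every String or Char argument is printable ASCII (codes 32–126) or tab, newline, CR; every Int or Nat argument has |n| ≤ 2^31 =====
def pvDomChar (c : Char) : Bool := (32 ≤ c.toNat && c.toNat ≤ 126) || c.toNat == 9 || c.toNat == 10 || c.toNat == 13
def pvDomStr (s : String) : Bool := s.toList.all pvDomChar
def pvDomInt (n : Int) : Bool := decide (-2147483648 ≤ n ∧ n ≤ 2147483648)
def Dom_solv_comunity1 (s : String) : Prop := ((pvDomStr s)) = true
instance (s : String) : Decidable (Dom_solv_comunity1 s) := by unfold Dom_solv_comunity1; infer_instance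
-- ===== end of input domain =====

-- B replaces A's index-weighted pass (len(s)-i per position) by running prefix counts:
-- each step bumps a vowel/consonant counter and adds the running counter to the score (objective: alternative).

-- ===== PORT A =====
def solv_comunity1 (s : String) : String × Int :=
  let vowels : List Char := ['A', 'E', 'I', 'O', 'U']
  let p :=
    (PySem.List.pyRange 0 (PySem.Str.len s) 1).foldl
      (fun (st : Int × Int) i =>
        if PySem.List.pyGetD s.toList i ' ' ∈ vowels then
          (st.1 + (PySem.Str.len s - i), st.2)
        else
          (st.1, st.2 + (PySem.Str.len s - i)))
      (0, 0)
  if p.1 > p.2 then ("Kevin", p.1)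
  else if p.1 < p.2 then ("Stuart", p.2)
  else ("Draw", p.1)

-- ===== PORT B =====
def solv_comunity1_alt (s : String) : String × Int :=
  let vowels : List Char := ['A', 'E', 'I', 'O', 'U']
  let q :=
    s.toList.foldl
      (fun (st : Int × Int × Int × Int) c =>
        let kevsc := st.1; let stusc := st.2.1; let cv := st.2.2.1; let cc := st.2.2.2
        if c ∈ vowels then (kevsc + (cv + 1), stusc + cc, cv + 1, cc)
        else (kevsc + cv, stusc + (cc + 1), cv, cc + 1))
      (0, 0, 0, 0)
  if q.1 > q.2.1 then ("Kevin", q.1)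
  else if q.1 < q.2.1 then ("Stuart", q.2.1)
  else ("Draw", q.1)

-- ===== PRECONDITION & SPEC =====
def Spec_solv_comunity1 (s : String) (out : String × Int) : Prop := out = solv_comunity1_alt s
instance (s : String) (out : String × Int) : Decidable (Spec_solv_comunity1 s out) := by unfold Spec_solv_comunity1; infer_instance

-- ===== CLAIM =====
def Claim_equal_solv_comunity1 : Prop := ∀ (s : String), Dom_solv_comunity1 s → Spec_solv_comunity1 s (solv_comunity1 s)

-- ===== LEMMAS AND PROOFS =====

-- sum of weights d, d-1, … over the vowel positions of l
def gw : List Char → Int → Int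
  | [], _ => 0
  | c :: l, d => (if c ∈ (['A', 'E', 'I', 'O', 'U'] : List Char) then d else 0) + gw l (d - 1)

-- same over the consonant positions
def hw : List Char → Int → Int
  | [], _ => 0
  | c :: l, d => (if c ∈ (['A', 'E', 'I', 'O', 'U'] : List Char) then 0 else d) + hw l (d - 1)

-- number of vowels / consonants of l, as Int
def nv : List Char → Int
  | [] => 0
  | c :: l => (if c ∈ (['A', 'E', 'I', 'O', 'U'] : List Char) then 1 else 0) + nv l

def nc : List Char → Int
  | [] => 0
  | c :: l => (if c ∈ (['A', 'E', 'I', 'O', 'U'] : List Char) then 0 else 1) + nc l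

-- A's enumerate fold accumulates exactly the weighted vowel/consonant sums.
lemma foldA_enum (d : Int) (l : List Char) : ∀ (s0 a b : Int),
    (PySem.List.enumerate l s0).foldl
        (fun (st : Int × Int) (p : Int × Char) =>
          if p.2 ∈ (['A', 'E', 'I', 'O', 'U'] : List Char) then (st.1 + (d - p.1), st.2)
          else (st.1, st.2 + (d - p.1))) (a, b)
      = (a + gw l (d - s0), b + hw l (d - s0)) := by
  induction l with
  | nil => intro s0 a b; simp [PySem.List.enumerate_nil, gw, hw]
  | cons c l ih =>
      intro s0 a b
      rw [PySem.List.enumerate_cons]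
      by_cases h : c ∈ (['A', 'E', 'I', 'O', 'U'] : List Char)
      · simp only [List.foldl_cons, if_pos h, ih (s0 + 1), gw, hw, if_pos h]
        have e : d - (s0 + 1) = d - s0 - 1 := by ring
        rw [e]; simp only [Prod.mk.injEq]; constructor <;> ring
      · simp only [List.foldl_cons, if_neg h, ih (s0 + 1), gw, hw, if_neg h]
        have e : d - (s0 + 1) = d - s0 - 1 := by ring
        rw [e]; simp only [Prod.mk.injEq]; constructor <;> ring

-- B's running-count fold: scores are count*|l| plus the weighted sums, counters advance by the counts.
lemma foldB (l : List Char) : ∀ (k st cv cc : Int),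
    l.foldl
        (fun (q : Int × Int × Int × Int) c =>
          if c ∈ (['A', 'E', 'I', 'O', 'U'] : List Char) then
            (q.1 + (q.2.2.1 + 1), q.2.1 + q.2.2.2, q.2.2.1 + 1, q.2.2.2)
          else (q.1 + q.2.2.1, q.2.1 + (q.2.2.2 + 1), q.2.2.1, q.2.2.2 + 1)) (k, st, cv, cc)
      = (k + cv * l.length + gw l l.length,
         st + cc * l.length + hw l l.length,
         cv + nv l, cc + nc l) := by
  induction l with
  | nil => intro k st cv cc; simp [gw, hw, nv, nc]
  | cons c l ih =>
      intro k st cv cc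
      have e : ((c :: l).length : Int) = (l.length : Int) + 1 := by push_cast [List.length_cons]; ring
      by_cases h : c ∈ (['A', 'E', 'I', 'O', 'U'] : List Char)
      · simp only [List.foldl_cons, if_pos h, ih, gw, hw, nv, nc, if_pos h, e, Prod.mk.injEq]
        have e2 : (l.length : Int) + 1 - 1 = (l.length : Int) := by ring
        rw [e2]
        refine ⟨by ring, by ring, by ring, by ring⟩
      · simp only [List.foldl_cons, if_neg h, ih, gw, hw, nv, nc, if_neg h, e, Prod.mk.injEq]
        have e2 : (l.length : Int) + 1 - 1 = (l.length : Int) := by ring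
        rw [e2]
        refine ⟨by ring, by ring, by ring, by ring⟩

-- ===== VERDICT =====
theorem solv_comunity1_spec : Claim_equal_solv_comunity1 := by
  intro s _
  unfold Spec_solv_comunity1
  simp only [solv_comunity1, solv_comunity1_alt, PySem.Str.len_eq]
  -- A's index loop is the enumerate loop read through pyGetD
  have hE : (PySem.List.pyRange 0 ((s.toList.length : Int)) 1).foldl
      (fun (st : Int × Int) i =>
        if PySem.List.pyGetD s.toList i ' ' ∈ (['A', 'E', 'I', 'O', 'U'] : List Char) then
          (st.1 + ((s.toList.length : Int) - i), st.2)
        else (st.1, st.2 + ((s.toList.length : Int) - i))) ((0 : Int), (0 : Int))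
      = (PySem.List.enumerate s.toList).foldl
          (fun (st : Int × Int) (p : Int × Char) =>
            if p.2 ∈ (['A', 'E', 'I', 'O', 'U'] : List Char) then
              (st.1 + ((s.toList.length : Int) - p.1), st.2)
            else (st.1, st.2 + ((s.toList.length : Int) - p.1))) ((0 : Int), (0 : Int)) := by
    rw [PySem.List.enumerate_eq_map_pyRange s.toList ' ', List.foldl_map]
    simp only [PySem.List.len_eq]
  rw [hE, foldA_enum, foldB]
  simp
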